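-- pv_equiv track=rewrite | github.com/CyberMind-FR/secubox-openwrt | package/secubox/secubox-app-streamlit/files/srv/streamlit/apps/wuyun_liuqi/wuyun_liuqi.py | get_gregorian_years
-- ===== SOURCE A (Python) =====
-- def get_gregorian_years(position, start=1984, end=2103):
--     """Get Gregorian years for a Jiazi position."""
--     base = 1984 + (position - 1)
--     years = []
--     y = base
--     while y > start: y -= 60
--     while y < start: y += 60
--     while y <= end:
--         years.append(y)
--         y += 60
--     return years
-- ===== SOURCE B (Python) =====
-- def get_gregorian_years(position, start=1984, end=2103):
--     """Get Gregorian years for a Jiazi position."""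
--     base = 1984 + (position - 1)
--     first = start + (base - start) % 60
--     return list(range(first, end + 1, 60))
-- ===== Notes on version B (the rewrite author's own statement) =====
-- stated objective: simpler
-- what changed: Replaces the two residue-alignment while-loops with the closed form first = start + (base - start) % 60 and the collection loop with list(range(first, end + 1, 60)).
import Mathlib
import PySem

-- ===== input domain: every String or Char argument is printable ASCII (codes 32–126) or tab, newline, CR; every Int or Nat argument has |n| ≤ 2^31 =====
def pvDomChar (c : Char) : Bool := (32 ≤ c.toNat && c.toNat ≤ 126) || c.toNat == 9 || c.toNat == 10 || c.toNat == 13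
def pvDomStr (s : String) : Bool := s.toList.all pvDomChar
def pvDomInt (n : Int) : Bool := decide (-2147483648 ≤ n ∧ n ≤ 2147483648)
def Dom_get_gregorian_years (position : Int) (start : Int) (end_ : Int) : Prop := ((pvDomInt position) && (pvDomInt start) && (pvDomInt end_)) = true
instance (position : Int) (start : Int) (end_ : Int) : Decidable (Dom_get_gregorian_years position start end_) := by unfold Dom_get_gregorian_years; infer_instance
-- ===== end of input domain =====

-- B replaces A's two residue-alignment while-loops with the closed form
-- start + (base - start) % 60 and the collection loop with list(range(first, end+1, 60)); objective: simpler.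


-- ===== PORT A =====
-- while y > start: y -= 60
def pvDownA (y start : Int) : Int :=
  if start < y then pvDownA (y - 60) start else y
termination_by (y - start).toNat
decreasing_by omega

-- while y < start: y += 60
def pvUpA (y start : Int) : Int :=
  if y < start then pvUpA (y + 60) start else y
termination_by (start - y).toNat
decreasing_by omega

-- while y <= end: years.append(y); y += 60
def pvCollectA (y end_ : Int) : List Int :=
  if y ≤ end_ then y :: pvCollectA (y + 60) end_ else []
termination_by (end_ + 1 - y).toNat
decreasing_by omega

def get_gregorian_years (position : Int) (start : Int) (end_ : Int) : List Int :=
  let base := 1984 + (position - 1)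
  pvCollectA (pvUpA (pvDownA base start) start) end_

-- ===== PORT B =====
def get_gregorian_years_alt (position : Int) (start : Int) (end_ : Int) : List Int :=
  let base := 1984 + (position - 1)
  let first := start + PySem.Int.mod (base - start) 60
  PySem.List.pyRange first (end_ + 1) 60

-- ===== PRECONDITION & SPEC =====
def Spec_get_gregorian_years (position : Int) (start : Int) (end_ : Int) (out : List Int) : Prop := out = get_gregorian_years_alt position start end_
instance (position : Int) (start : Int) (end_ : Int) (out : List Int) : Decidable (Spec_get_gregorian_years position start end_ out) := by unfold Spec_get_gregorian_years; infer_instance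

-- ===== CLAIM (what is proved, stated in full; the proofs are below) =====
def Claim_equal_get_gregorian_years : Prop := ∀ (position : Int) (start : Int) (end_ : Int), Dom_get_gregorian_years position start end_ → Spec_get_gregorian_years position start end_ (get_gregorian_years position start end_)

-- ===== LEMMAS AND PROOFS =====

theorem pvDownA_le (start y : Int) : pvDownA y start ≤ start := by
  refine pvDownA.induct start (fun y => pvDownA y start ≤ start) ?_ ?_ y
  · intro x h ih; rw [pvDownA, if_pos h]; exact ih
  · intro x h; rw [pvDownA, if_neg h]; omega

theorem pvDownA_dvd (start y : Int) : (60 : Int) ∣ (y - pvDownA y start) := by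
  refine pvDownA.induct start (fun y => (60 : Int) ∣ (y - pvDownA y start)) ?_ ?_ y
  · intro x h ih; rw [pvDownA, if_pos h]; omega
  · intro x h; rw [pvDownA, if_neg h]; simp

theorem pvUpA_ge (start y : Int) : start ≤ pvUpA y start := by
  refine pvUpA.induct start (fun y => start ≤ pvUpA y start) ?_ ?_ y
  · intro x h ih; rw [pvUpA, if_pos h]; exact ih
  · intro x h; rw [pvUpA, if_neg h]; omega

theorem pvUpA_lt (start y : Int) (h : y ≤ start) : pvUpA y start < start + 60 := by
  refine pvUpA.induct start (fun y => y ≤ start → pvUpA y start < start + 60) ?_ ?_ y h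
  · intro x hlt ih _
    rw [pvUpA, if_pos hlt]
    by_cases h2 : x + 60 ≤ start
    · exact ih h2
    · rw [pvUpA, if_neg (by omega)]; omega
  · intro x hge _; rw [pvUpA, if_neg hge]; omega

theorem pvUpA_dvd (start y : Int) : (60 : Int) ∣ (pvUpA y start - y) := by
  refine pvUpA.induct start (fun y => (60 : Int) ∣ (pvUpA y start - y)) ?_ ?_ y
  · intro x h ih; rw [pvUpA, if_pos h]; omega
  · intro x h; rw [pvUpA, if_neg h]; simp

theorem align_eq (base start : Int) :
    pvUpA (pvDownA base start) start = start + (base - start).emod 60 := by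
  have hdle := pvDownA_le start base
  have hddvd := pvDownA_dvd start base
  have huge := pvUpA_ge start (pvDownA base start)
  have hudvd := pvUpA_dvd start (pvDownA base start)
  have hlt := pvUpA_lt start (pvDownA base start) hdle
  have h1 : 0 ≤ (base - start).emod 60 := Int.emod_nonneg _ (by norm_num)
  have h2 : (base - start).emod 60 < 60 := Int.emod_lt_of_pos _ (by norm_num)
  have h3 : (base - start).emod 60 = base - start - 60 * ((base - start) / 60) := by
    exact Int.emod_def _ _
  omega

theorem collect_eq (end_ y : Int) :
    pvCollectA y end_ = PySem.List.pyRange y (end_ + 1) 60 := by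
  refine pvCollectA.induct end_ (fun y => pvCollectA y end_ = PySem.List.pyRange y (end_ + 1) 60) ?_ ?_ y
  · intro x h ih
    rw [pvCollectA, if_pos h, ih,
      PySem.List.pyRange_of_pos _ _ (by norm_num : (0:Int) < 60),
      PySem.List.pyRange_of_pos _ _ (by norm_num : (0:Int) < 60)]
    rw [if_pos (by omega : x < end_ + 1)]
    have hn : ((end_ + 1 - x + 60 - 1) / 60).toNat =
        (if x + 60 < end_ + 1 then ((end_ + 1 - (x + 60) + 60 - 1) / 60).toNat else 0) + 1 := by
      split_ifs with h2 <;> omega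
    rw [hn, List.range_succ_eq_map]
    simp only [List.map_cons, List.map_map]
    congr 1
    · simp
    · exact List.map_congr_left fun k _ => by simp only [Function.comp_apply]; push_cast; ring
  · intro x h
    rw [pvCollectA, if_neg h,
      PySem.List.pyRange_of_pos _ _ (by norm_num : (0:Int) < 60),
      if_neg (by omega : ¬ x < end_ + 1)]
    simp

theorem mod_eq_emod (a : Int) : PySem.Int.mod a 60 = a.emod 60 :=
  PySem.Int.mod_eq_emod_of_pos (by norm_num)

-- ===== VERDICT (by name: the statement is the Claim_ definition above) =====
theorem get_gregorian_years_spec : Claim_equal_get_gregorian_years := by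
  intro position start end_ _
  unfold Spec_get_gregorian_years get_gregorian_years get_gregorian_years_alt
  simp only
  rw [align_eq, collect_eq, mod_eq_emod]
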